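-- pv_equiv track=rewrite | github.com/rpietsch1953/pcs-pylibs | pcs_argpass/Param.py | _long_has_args
-- ===== SOURCE A (Python) =====
-- class GetoptError(Exception):
--     opt = ''
--     msg = ''
--     def __init__(self, msg, opt=''):
--         self.msg = msg
--         self.opt = opt
--         Exception.__init__(self, msg, opt)
--
--     def __str__(self):
--         return self.msg
--
-- def _long_has_args(opt, longopts):
--     possibilities = [o for o in longopts if o.startswith(opt)]
--     if not possibilities:
--         raise GetoptError('option --%s not recognized' % opt, opt)
--     # Is there an exact match?
--     if opt in possibilities:
--         return False, opt
--     elif opt + '=' in possibilities: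
--         return True, opt
--     # No exact match, so better be unique.
--     if len(possibilities) > 1:
--         # XXX since possibilities contains all valid continuations, might be
--         # nice to work them into the error msg
--         raise GetoptError('option --%s not a unique prefix' % opt, opt)
--     assert len(possibilities) == 1
--     unique_match = possibilities[0]
--     has_arg = unique_match.endswith('=')
--     if has_arg:
--         unique_match = unique_match[:-1]
--     return has_arg, unique_match
-- ===== SOURCE B (Python) =====
-- class GetoptError(Exception):
--     opt = ''
--     msg = ''
--     def __init__(self, msg, opt=''):
--         self.msg = msg
--         self.opt = opt
--         Exception.__init__(self, msg, opt)
--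
--     def __str__(self):
--         return self.msg
--
-- def _unique_prefix_match(opt, rest):
--     # recursively find the sole long option that opt is a prefix of
--     if not rest:
--         raise GetoptError('option --%s not recognized' % opt, opt)
--     head, tail = rest[0], rest[1:]
--     if not head.startswith(opt):
--         return _unique_prefix_match(opt, tail)
--     if any(o.startswith(opt) for o in tail):
--         raise GetoptError('option --%s not a unique prefix' % opt, opt)
--     return head
--
-- def _long_has_args(opt, longopts):
--     # exact matches are decided directly on longopts, before any prefix scan:
--     # an exact hit is itself a prefix match, so A's "not recognized" check
--     # (empty prefix-match set) can never fire when one of these succeeds.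
--     if opt in longopts:
--         return False, opt
--     if opt + '=' in longopts:
--         return True, opt
--     m = _unique_prefix_match(opt, longopts)
--     if m.endswith('='):
--         return True, m[:-1]
--     return False, m
-- ===== Notes on version B (the rewrite author's own statement) =====
-- stated objective: alternative
-- what changed: Exact-match cases are decided by direct membership tests on longopts before any prefix scan (valid since an exact hit is itself a prefix match), and the possibilities list is gone: a recursive helper finds the unique prefix match or raises, so no intermediate list, no len(), no index [0].
import Mathlib
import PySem

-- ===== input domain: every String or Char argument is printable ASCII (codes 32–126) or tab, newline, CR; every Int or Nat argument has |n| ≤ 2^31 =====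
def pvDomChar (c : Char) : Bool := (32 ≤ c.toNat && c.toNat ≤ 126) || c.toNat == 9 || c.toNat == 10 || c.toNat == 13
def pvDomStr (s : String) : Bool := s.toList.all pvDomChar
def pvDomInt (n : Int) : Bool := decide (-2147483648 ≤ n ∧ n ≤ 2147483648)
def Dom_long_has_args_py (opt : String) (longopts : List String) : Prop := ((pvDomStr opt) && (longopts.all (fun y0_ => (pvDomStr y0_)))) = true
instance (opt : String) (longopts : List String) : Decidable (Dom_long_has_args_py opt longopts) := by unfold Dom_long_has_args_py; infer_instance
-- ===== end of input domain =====

-- B decides the exact-match cases by direct membership tests on longopts and replaces the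
-- possibilities list (and its len/index passes) by a recursive unique-prefix search.

-- ===== PORT A =====
-- raising branches (GetoptError) are excluded by Pre_; the port returns (false, "") there
def long_has_args_py (opt : String) (longopts : List String) : Bool × String :=
  let possibilities := longopts.filter (fun o => PySem.Str.startswith o opt)
  if possibilities = [] then (false, "")  -- raise GetoptError('option --%s not recognized')
  else if possibilities.contains opt then (false, opt)
  else if possibilities.contains (opt ++ "=") then (true, opt)
  else if possibilities.length > 1 then (false, "")  -- raise GetoptError('option --%s not a unique prefix')
  else
    let unique_match := possibilities.headD ""
    let has_arg := PySem.Str.endswith unique_match "="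
    if has_arg then (has_arg, PySem.Str.slice unique_match none (some (-1)))
    else (has_arg, unique_match)

-- ===== PORT B =====
-- port of _unique_prefix_match: none stands for either raise (both become (false, "") above)
def uniquePrefixMatch (opt : String) : List String → Option String
  | [] => none  -- raise GetoptError('option --%s not recognized')
  | head :: tail =>
    if ¬ PySem.Str.startswith head opt then uniquePrefixMatch opt tail
    else if tail.any (fun o => PySem.Str.startswith o opt) then
      none  -- raise GetoptError('option --%s not a unique prefix')
    else some head

def long_has_args_py_alt (opt : String) (longopts : List String) : Bool × String :=
  if longopts.contains opt then (false, opt)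
  else if longopts.contains (opt ++ "=") then (true, opt)
  else
    match uniquePrefixMatch opt longopts with
    | none => (false, "")  -- the helper raised
    | some m =>
      if PySem.Str.endswith m "=" then (true, PySem.Str.slice m none (some (-1)))
      else (false, m)

-- ===== PRECONDITION & SPEC =====
-- Pre_ excludes exactly the inputs on which A raises GetoptError (no long option starts
-- with opt, or the prefix is ambiguous with no exact match); B raises identically there.
def Pre_long_has_args_py (opt : String) (longopts : List String) : Prop :=
  let ps := longopts.filter (fun o => PySem.Str.startswith o opt)
  ps ≠ [] ∧ (ps.contains opt = true ∨ ps.contains (opt ++ "=") = true ∨ ps.length = 1)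
instance (opt : String) (longopts : List String) : Decidable (Pre_long_has_args_py opt longopts) := by unfold Pre_long_has_args_py; infer_instance

def pvWitness_long_has_args_py : String × List String := ("foo", ["foo=", "foobar"])

def Spec_long_has_args_py (opt : String) (longopts : List String) (out : Bool × String) : Prop := out = long_has_args_py_alt opt longopts
instance (opt : String) (longopts : List String) (out : Bool × String) : Decidable (Spec_long_has_args_py opt longopts out) := by unfold Spec_long_has_args_py; infer_instance

-- ===== CLAIM =====
def Claim_equal_long_has_args_py : Prop := ∀ (opt : String) (longopts : List String), Dom_long_has_args_py opt longopts → Pre_long_has_args_py opt longopts → Spec_long_has_args_py opt longopts (long_has_args_py opt longopts)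

-- ===== LEMMAS AND PROOFS =====

theorem startswith_self (s : String) : PySem.Str.startswith s s = true := by
  simp [PySem.Chars.startswith_iff]

-- membership in longopts coincides with membership in the prefix-filtered list,
-- for any string that opt is a prefix of
theorem mem_filter_of_self (opt x : String) (l : List String)
    (hx : PySem.Str.startswith x opt = true) :
    (l.filter (fun o => PySem.Str.startswith o opt)).contains x = l.contains x := by
  simp only [List.contains_eq_mem, List.mem_filter]
  simp only [PySem.Str.startswith_eq] at hx
  by_cases h : x ∈ l <;> simp [h, hx]

-- the recursive helper finds exactly the singleton of the filtered list
theorem uniquePrefixMatch_char (opt : String) (l : List String) :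
    uniquePrefixMatch opt l =
      match l.filter (fun o => PySem.Str.startswith o opt) with
      | [m] => some m
      | _ => none := by
  induction l with
  | nil => simp [uniquePrefixMatch]
  | cons h t ih =>
    rw [List.filter_cons]
    by_cases hh : PySem.Str.startswith h opt = true
    · rw [if_pos hh]
      unfold uniquePrefixMatch
      rw [if_neg (by simp only [PySem.Str.startswith_eq] at hh; simp [hh])]
      by_cases ha : t.any (fun o => PySem.Str.startswith o opt) = true
      · rw [if_pos ha]
        obtain ⟨x, hx, hxs⟩ := List.any_eq_true.mp ha
        have : x ∈ t.filter (fun o => PySem.Str.startswith o opt) :=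
          List.mem_filter.mpr ⟨hx, hxs⟩
        cases hft : t.filter (fun o => PySem.Str.startswith o opt) with
        | nil => rw [hft] at this; simp at this
        | cons a b => simp
      · rw [if_neg ha]
        have hft : t.filter (fun o => PySem.Str.startswith o opt) = [] :=
          List.filter_eq_nil_iff.mpr (fun x hx => by
            intro hxs
            exact ha (List.any_eq_true.mpr ⟨x, hx, hxs⟩))
        rw [hft]
    · rw [if_neg hh]
      unfold uniquePrefixMatch
      rw [if_pos (by simp only [PySem.Str.startswith_eq] at hh; simp [hh])]
      exact ih

-- ===== VERDICT =====
theorem long_has_args_py_spec : Claim_equal_long_has_args_py := by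
  intro opt longopts _ hpre
  unfold Spec_long_has_args_py long_has_args_py long_has_args_py_alt
  unfold Pre_long_has_args_py at hpre
  rw [uniquePrefixMatch_char]
  have hmem1 := mem_filter_of_self opt opt longopts (startswith_self opt)
  have hmem2 := mem_filter_of_self opt (opt ++ "=") longopts
    (by simp [PySem.Chars.startswith_iff])
  generalize hps : longopts.filter (fun o => PySem.Str.startswith o opt) = ps at hpre hmem1 hmem2 ⊢
  obtain ⟨hne, hcase⟩ := hpre
  rw [if_neg hne, ← hmem1, ← hmem2]
  by_cases h1 : ps.contains opt = true
  · rw [if_pos h1, if_pos h1]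
  · rw [if_neg h1, if_neg h1]
    by_cases h2 : ps.contains (opt ++ "=") = true
    · rw [if_pos h2, if_pos h2]
    · rw [if_neg h2, if_neg h2]
      have hlen : ps.length = 1 := by tauto
      obtain ⟨m, hm⟩ := List.length_eq_one_iff.mp hlen
      subst hm
      by_cases he : PySem.Chars.endswith m.toList ['='] = true <;> simp [he]
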